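-- pv_equiv track=rewrite | github.com/pypi-data/pypi-mirror-313 | packages/tinybird/tinybird-0.0.1.dev0.tar.gz/tinybird-0.0.1.dev0/tinybird/csv_processing_queue.py | initial_newline_chars
-- ===== SOURCE A (Python) =====
-- def initial_newline_chars(data):
--     """
--     >>> initial_newline_chars('\\r\\n\\r\\nabcd')
--     4
--     >>> initial_newline_chars('\\n\\n\\n')
--     3
--     >>> initial_newline_chars('\\n\\n\\n123,"\\n\\n"')
--     3
--     >>> initial_newline_chars('\\n\\n\\n\\r"')
--     3
--     """
--     i = 0
--     data_len = len(data)
--     while i < data_len: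
--         if data[i] == "\n":
--             i += 1
--         elif data[i] == "\r" and i < (data_len - 1) and data[i + 1] == "\n":
--             i += 2
--         else:
--             break
--     return i
-- ===== SOURCE B (Python) =====
-- import re
--
-- _LEADING_NL = re.compile(r'(?:\n|\r\n)*')
--
-- def initial_newline_chars(data):
--     return _LEADING_NL.match(data).end()
-- ===== Notes on version B (the rewrite author's own statement) =====
-- stated objective: idiomatic
-- what changed: Replaces the manual index-advancing while loop with one anchored regex match (?:\n|\r\n)* whose match length is the answer.
import Mathlib
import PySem

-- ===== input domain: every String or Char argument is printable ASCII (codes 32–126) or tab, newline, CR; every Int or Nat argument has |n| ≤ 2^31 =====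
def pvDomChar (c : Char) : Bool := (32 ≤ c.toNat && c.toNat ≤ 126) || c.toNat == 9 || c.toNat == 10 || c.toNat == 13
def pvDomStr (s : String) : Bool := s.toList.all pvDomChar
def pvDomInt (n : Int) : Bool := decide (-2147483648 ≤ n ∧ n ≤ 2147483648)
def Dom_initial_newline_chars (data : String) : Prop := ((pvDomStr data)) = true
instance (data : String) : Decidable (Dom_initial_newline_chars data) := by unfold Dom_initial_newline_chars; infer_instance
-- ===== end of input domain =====

-- ===== PORT A =====
-- Header: B replaces A's index-advancing while loop with one anchored regex match; same return value (idiomatic).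
-- Literal port of A's while loop: index i advances by 1 on '\n', by 2 on "\r\n", else break.
def initialNLLoopA (l : List Char) (i : Nat) : Nat :=
  if h : i < l.length then
    if l[i] = '\n' then initialNLLoopA l (i + 1)
    else if l[i] = '\r' ∧ i + 1 < l.length ∧ l[i+1]? = some '\n' then initialNLLoopA l (i + 2)
    else i
  else i
termination_by l.length - i

def initial_newline_chars (data : String) : Int :=
  (initialNLLoopA data.toList 0 : Int)

-- ===== PORT B =====
-- Port of B's regex (?:\n|\r\n)*: the greedy anchored match is the maximal prefix consumed by
-- repeatedly taking '\n' (tried first) or "\r\n"; its length is returned.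
def initialNLMatchB : List Char → Nat
  | '\n' :: rest => 1 + initialNLMatchB rest
  | '\r' :: '\n' :: rest => 2 + initialNLMatchB rest
  | _ => 0

def initial_newline_chars_alt (data : String) : Int :=
  (initialNLMatchB data.toList : Int)

def Spec_initial_newline_chars (data : String) (out : Int) : Prop := out = initial_newline_chars_alt data
instance (data : String) (out : Int) : Decidable (Spec_initial_newline_chars data out) := by unfold Spec_initial_newline_chars; infer_instance

-- ===== CLAIM (what is proved, stated in full; the proofs are below) =====
def Claim_equal_initial_newline_chars : Prop := ∀ (data : String), Dom_initial_newline_chars data → Spec_initial_newline_chars data (initial_newline_chars data)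

-- ===== LEMMAS AND PROOFS =====
theorem initialNLMatchB_cons_zero (c : Char) (rest : List Char) (h1 : c ≠ '\n')
    (h2 : ¬(c = '\r' ∧ rest.head? = some '\n')) : initialNLMatchB (c :: rest) = 0 := by
  unfold initialNLMatchB
  split
  · next heq => injection heq with ha hb; exact absurd ha h1
  · next r heq =>
    injection heq with ha hb; subst hb
    exact absurd ⟨ha, rfl⟩ h2
  · rfl

theorem initialNL_loop_eq_match (l : List Char) (i : Nat) :
    initialNLLoopA l i = i + initialNLMatchB (l.drop i) := by
  fun_induction initialNLLoopA l i with
  | case1 i h hnl ih =>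
    rw [ih, List.drop_eq_getElem_cons h, hnl]
    simp [initialNLMatchB]; omega
  | case2 i h hnl hcr ih =>
    obtain ⟨hc, hlt, hnext⟩ := hcr
    rw [List.getElem?_eq_getElem hlt] at hnext
    rw [ih, List.drop_eq_getElem_cons h, List.drop_eq_getElem_cons hlt, hc,
      Option.some_inj.mp hnext]
    have e : i + 1 + 1 = i + 2 := rfl
    simp only [initialNLMatchB, e]; omega
  | case3 i h hnl hcr =>
    have h2 : ¬(l[i] = '\r' ∧ (List.drop (i + 1) l).head? = some '\n') := by
      intro ⟨ha, hb⟩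
      rw [List.head?_drop] at hb
      have hlt : i + 1 < l.length := by
        by_contra hge
        rw [List.getElem?_eq_none (by omega)] at hb
        simp at hb
      exact hcr ⟨ha, hlt, hb⟩
    rw [List.drop_eq_getElem_cons h, initialNLMatchB_cons_zero _ _ hnl h2]
    omega
  | case4 i h =>
    rw [List.drop_eq_nil_of_le (by omega)]
    simp [initialNLMatchB]

-- ===== VERDICT (by name: the statement is the Claim_ definition above) =====
theorem initial_newline_chars_spec : Claim_equal_initial_newline_chars := by
  intro data _
  unfold Spec_initial_newline_chars initial_newline_chars initial_newline_chars_alt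
  rw [initialNL_loop_eq_match]
  simp
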